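-- pv_equiv track=rewrite | github.com/RonxBulld/yosys | memory_config_generator.py | generate_bit_vector
-- ===== SOURCE A (Python) =====
-- def generate_bit_vector(values, port_count):
--     """生成位向量参数"""
--     if isinstance(values, list):
--         if len(values) != port_count:
--             raise ValueError(f"值列表长度 {len(values)} 与端口数量 {port_count} 不匹配")
--         # 转换为位向量字符串
--         bit_str = ''.join(['1' if v else '0' for v in reversed(values)])
--         return f"{port_count}'b{bit_str}"
--     else:
--         # 统一值
--         return f"{port_count}'b" + str(values) * port_count
-- ===== SOURCE B (Python) =====
-- def generate_bit_vector(values, port_count):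
--     """生成位向量参数"""
--     if not isinstance(values, list):
--         # 统一值
--         return f"{port_count}'b" + str(values) * port_count
--     if len(values) != port_count:
--         raise ValueError(f"值列表长度 {len(values)} 与端口数量 {port_count} 不匹配")
--     # pack the flags into one integer, index 0 = least-significant bit
--     n = 0
--     w = 1
--     for v in values:
--         if v:
--             n += w
--         w += w
--     bit_str = format(n, '0{}b'.format(port_count)) if port_count else ''
--     return f"{port_count}'b{bit_str}"
-- ===== Notes on version B (the rewrite author's own statement) =====
-- stated objective: alternative
-- what changed: Instead of reversing the list and joining per-element characters, B packs the flags into one integer in a single forward pass (index 0 = LSB) and renders it with zero-padded binary formatting of width port_count.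
import Mathlib
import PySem

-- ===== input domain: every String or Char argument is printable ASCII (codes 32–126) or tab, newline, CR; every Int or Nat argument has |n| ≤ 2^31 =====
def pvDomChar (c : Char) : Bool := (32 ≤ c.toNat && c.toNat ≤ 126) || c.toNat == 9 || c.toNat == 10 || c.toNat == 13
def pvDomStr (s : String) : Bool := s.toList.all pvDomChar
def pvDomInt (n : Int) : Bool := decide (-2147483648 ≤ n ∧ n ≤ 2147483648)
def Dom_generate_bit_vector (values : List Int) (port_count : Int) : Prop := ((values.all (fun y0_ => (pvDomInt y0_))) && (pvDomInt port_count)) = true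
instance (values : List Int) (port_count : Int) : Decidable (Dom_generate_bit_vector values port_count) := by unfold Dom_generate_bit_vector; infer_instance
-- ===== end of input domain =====

-- B packs the flags into one integer in a single forward pass and renders it as a
-- zero-padded binary string, instead of A's reverse-and-join of per-element characters;
-- objective: alternative (same cost, different algorithm).
-- Under the type convention `values` is always a list, so only A's list branch is reachable.

-- ===== PORT A =====
def generate_bit_vector (values : List Int) (port_count : Int) : String :=
  if (values.length : Int) ≠ port_count then
    ""  -- raise ValueError: excluded by Pre_generate_bit_vector
  else
    -- bit_str = ''.join(['1' if v else '0' for v in reversed(values)])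
    PySem.Int.toStr port_count ++ "'b" ++
      String.mk (values.reverse.map (fun v => if v ≠ 0 then '1' else '0'))

-- ===== PORT B =====
-- format(n, '0{w}b'): minimal binary digits of n left-padded with '0' to width w.
-- Exact here because the packed n always satisfies n < 2^w (w = port_count = len(values)).
def pvPadBin : Nat → Nat → List Char
  | 0, _ => []
  | w + 1, n => pvPadBin w (n / 2) ++ [if n % 2 = 1 then '1' else '0']

def generate_bit_vector_alt (values : List Int) (port_count : Int) : String :=
  if (values.length : Int) ≠ port_count then
    ""  -- raise ValueError: excluded by Pre_generate_bit_vector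
  else
    -- n, w loop: n accumulates the set bits, w = 2^i
    let nw := values.foldl
      (fun (p : Nat × Nat) v => (if v ≠ 0 then p.1 + p.2 else p.1, p.2 + p.2)) (0, 1)
    let bit_str := if port_count = 0 then "" else String.mk (pvPadBin port_count.toNat nw.1)
    PySem.Int.toStr port_count ++ "'b" ++ bit_str

-- ===== PRECONDITION & SPEC =====
-- Pre_ excludes exactly the inputs where A raises ValueError (length mismatch).
def Pre_generate_bit_vector (values : List Int) (port_count : Int) : Prop :=
  (values.length : Int) = port_count
instance (values : List Int) (port_count : Int) : Decidable (Pre_generate_bit_vector values port_count) := by unfold Pre_generate_bit_vector; infer_instance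

def pvWitness_generate_bit_vector : List Int × Int := ([1, 0, 1], 3)

def Spec_generate_bit_vector (values : List Int) (port_count : Int) (out : String) : Prop := out = generate_bit_vector_alt values port_count
instance (values : List Int) (port_count : Int) (out : String) : Decidable (Spec_generate_bit_vector values port_count out) := by unfold Spec_generate_bit_vector; infer_instance

-- ===== CLAIM (what is proved, stated in full; the proofs are below) =====
def Claim_equal_generate_bit_vector : Prop := ∀ (values : List Int) (port_count : Int), Dom_generate_bit_vector values port_count → Pre_generate_bit_vector values port_count → Spec_generate_bit_vector values port_count (generate_bit_vector values port_count)

-- ===== LEMMAS AND PROOFS =====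
-- the integer B packs, characterised structurally (bit 0 = head)
def pvNatOf (vs : List Int) : Nat :=
  vs.foldr (fun v m => (if v ≠ 0 then 1 else 0) + 2 * m) 0

theorem pvFoldl_nw (vs : List Int) : ∀ n w : Nat,
    vs.foldl (fun (p : Nat × Nat) v => (if v ≠ 0 then p.1 + p.2 else p.1, p.2 + p.2)) (n, w)
      = (n + w * pvNatOf vs, w * 2 ^ vs.length) := by
  induction vs with
  | nil => intro n w; simp [pvNatOf]
  | cons v vs ih =>
    intro n w
    simp only [List.foldl_cons, ih, pvNatOf, List.foldr_cons]
    by_cases h : v ≠ 0 <;> simp [h, pvNatOf] <;> constructor <;> ring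

theorem pvPadBin_natOf (vs : List Int) :
    pvPadBin vs.length (pvNatOf vs)
      = vs.reverse.map (fun v => if v ≠ 0 then '1' else '0') := by
  induction vs with
  | nil => simp [pvPadBin, pvNatOf]
  | cons v vs ih =>
    set m := pvNatOf vs with hm
    have hval : pvNatOf (v :: vs) = (if v ≠ 0 then 1 else 0) + 2 * m := by
      simp [pvNatOf, hm]
    by_cases h : v ≠ 0
    · have h1 : ((1 : Nat) + 2 * m) / 2 = m := by omega
      have h2 : ((1 : Nat) + 2 * m) % 2 = 1 := by omega
      simp [pvPadBin, hval, h, h1, h2, ih]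
    · have h1 : (2 * m) / 2 = m := by omega
      have h2 : (2 * m) % 2 = 0 := by omega
      simp [pvPadBin, hval, h, h1, h2, ih]

-- ===== VERDICT (by name: the statement is the Claim_ definition above) =====
theorem generate_bit_vector_spec : Claim_equal_generate_bit_vector := by
  intro values port_count _ hpre
  unfold Spec_generate_bit_vector generate_bit_vector generate_bit_vector_alt
  have hlen : (values.length : Int) = port_count := hpre
  simp only [hlen, ne_eq, not_true_eq_false, if_false]
  have hnw := pvFoldl_nw values 0 1
  simp only [hnw]
  by_cases h0 : port_count = 0
  · have : values = [] := by
      have : values.length = 0 := by omega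
      exact List.length_eq_zero_iff.mp this
    subst this; simp only [h0]; norm_num; decide
  · have htn : port_count.toNat = values.length := by omega
    simp only [if_neg h0, htn, Nat.zero_add, Nat.one_mul, pvPadBin_natOf]
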